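-- pv_equiv track=rewrite | github.com/Chepak-Semen/alfred_pennyworth | Decorators/practice/homework_practice.py | calc
-- ===== SOURCE A (Python) =====
-- def calc(numb: int):
--     lst = []
--     for i in range(1, numb + 1):
--         a = 0
--         while i != a:
--             if len(lst) == numb:
--                 break
--             a += 1
--             lst.append(i)
--     return lst
-- ===== SOURCE B (Python) =====
-- def calc(numb: int):
--     out = []
--     for k in range(numb):
--         lo, hi = 1, k + 1      # invariant: lo <= answer <= hi
--         while lo < hi:
--             mid = (lo + hi) // 2
--             if mid * (mid + 1) // 2 <= k:
--                 lo = mid + 1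
--             else:
--                 hi = mid
--         out.append(lo)
--     return out
-- ===== Notes on version B (the rewrite author's own statement) =====
-- stated objective: alternative
-- what changed: Instead of generating runs by appending to a growing list under a length guard, B computes each output element independently of all others: the k-th element is the value whose triangular-number bracket contains k, found by binary-searching the triangular numbers; no list state, run generation or length check remains.
import Mathlib
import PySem

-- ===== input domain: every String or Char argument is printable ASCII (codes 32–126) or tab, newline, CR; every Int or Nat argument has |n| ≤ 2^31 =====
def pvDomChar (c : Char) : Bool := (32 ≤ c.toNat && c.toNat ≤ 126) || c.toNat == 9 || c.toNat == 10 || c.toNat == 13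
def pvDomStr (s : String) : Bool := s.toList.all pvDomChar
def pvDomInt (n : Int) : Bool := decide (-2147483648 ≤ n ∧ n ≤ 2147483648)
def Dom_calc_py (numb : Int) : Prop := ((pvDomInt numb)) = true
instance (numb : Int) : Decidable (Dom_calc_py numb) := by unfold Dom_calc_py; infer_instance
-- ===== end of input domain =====

-- B replaces A's run-generating append loop by computing each element independently from its
-- index via triangular-number inversion; objective: alternative (same result, different algorithm).


-- ===== PORT A =====
-- inner 'while i != a' loop; fuel i.toNat bounds the number of iterations (a goes 0..i)
def calcInnerA (numb i : Int) : Nat → Int → List Int → List Int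
  | 0, _, lst => lst
  | f + 1, a, lst =>
    if i ≠ a then
      if (lst.length : Int) = numb then lst
      else calcInnerA numb i f (a + 1) (lst ++ [i])
    else lst

def calc_py (numb : Int) : List Int :=
  (PySem.List.pyRange 1 (numb + 1) 1).foldl (fun lst i => calcInnerA numb i i.toNat 0 lst) []

-- ===== PORT B =====
-- 'while lo < hi' binary search; the gap hi - lo shrinks by at least 1 per iteration,
-- so fuel (hi - lo).toNat = k.toNat suffices for the initial bracket lo = 1, hi = k + 1
def calcVal (k : Int) : Nat → Int → Int → Int
  | 0, lo, _ => lo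
  | f + 1, lo, hi =>
    if lo < hi then
      let mid := PySem.Int.floordiv (lo + hi) 2
      if PySem.Int.floordiv (mid * (mid + 1)) 2 ≤ k then calcVal k f (mid + 1) hi
      else calcVal k f lo mid
    else lo

def calc_py_alt (numb : Int) : List Int :=
  (PySem.List.pyRange 0 numb 1).map (fun k => calcVal k k.toNat 1 (k + 1))

-- ===== PRECONDITION & SPEC =====
def Spec_calc_py (numb : Int) (out : List Int) : Prop := out = calc_py_alt numb
instance (numb : Int) (out : List Int) : Decidable (Spec_calc_py numb out) := by unfold Spec_calc_py; infer_instance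

-- ===== CLAIM (what is proved, stated in full; the proofs are below) =====
def Claim_equal_calc_py : Prop := ∀ (numb : Int), Dom_calc_py numb → Spec_calc_py numb (calc_py numb)

-- ===== LEMMAS AND PROOFS =====

-- the loop guard, doubled: i*(i+1)//2 ≤ k ↔ i*(i+1) ≤ 2*k (the product is even)
theorem tri_cond (i k : Int) : (PySem.Int.floordiv (i * (i + 1)) 2 ≤ k) ↔ i * (i + 1) ≤ 2 * k := by
  have h1 : (PySem.Int.floordiv (i * (i + 1)) 2 ≤ k) ↔ PySem.Int.floordiv (i * (i + 1)) 2 < k + 1 := by omega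
  rw [h1, PySem.Int.floordiv_lt_iff_lt_mul (by norm_num : (0:Int) < 2)]
  obtain ⟨m, hm⟩ := Int.even_mul_succ_self i
  omega

-- B's binary search keeps the invariant (lo-1)*lo ≤ 2*k < hi*(hi+1) and returns
-- the unique i ≥ 1 with (i-1)*i ≤ 2*k < i*(i+1)
theorem calcVal_spec : ∀ (f : Nat) (lo hi k : Int), 1 ≤ lo → lo ≤ hi →
    (lo - 1) * lo ≤ 2 * k → 2 * k < hi * (hi + 1) → (hi - lo).toNat ≤ f →
    1 ≤ calcVal k f lo hi ∧ (calcVal k f lo hi - 1) * calcVal k f lo hi ≤ 2 * k ∧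
      2 * k < calcVal k f lo hi * (calcVal k f lo hi + 1) := by
  intro f
  induction f with
  | zero =>
    intro lo hi k h1 hle hlo hhi hf
    have heq : lo = hi := by omega
    subst heq
    exact ⟨h1, hlo, hhi⟩
  | succ f ih =>
    intro lo hi k h1 hle hlo hhi hf
    rw [calcVal]
    by_cases hlt : lo < hi
    · rw [if_pos hlt]
      obtain ⟨hm1, hm2⟩ := PySem.Int.floordiv_two_mid_bounds hle
      have hm3 : PySem.Int.floordiv (lo + hi) 2 < hi := by
        rw [PySem.Int.floordiv_lt_iff_lt_mul (by norm_num : (0:Int) < 2)]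
        omega
      set mid := PySem.Int.floordiv (lo + hi) 2 with hmid
      by_cases h : PySem.Int.floordiv (mid * (mid + 1)) 2 ≤ k
      · rw [if_pos h]
        have h2 : mid * (mid + 1) ≤ 2 * k := (tri_cond mid k).1 h
        refine ih (mid + 1) hi k (by omega) (by omega) ?_ hhi (by omega)
        have he : (mid + 1 - 1) * (mid + 1) = mid * (mid + 1) := by ring
        rw [he]; exact h2
      · rw [if_neg h]
        have h2 : ¬ mid * (mid + 1) ≤ 2 * k := fun hc => h ((tri_cond mid k).2 hc)
        exact ih lo mid k h1 (by omega) hlo (by omega) (by omega)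
    · rw [if_neg hlt]
      have heq : lo = hi := by omega
      subst heq
      exact ⟨h1, hlo, hhi⟩

theorem tri_unique (r s k : Int) (hr1 : 1 ≤ r) (hr2 : (r - 1) * r ≤ 2 * k) (hr3 : 2 * k < r * (r + 1))
    (hs1 : 1 ≤ s) (hs2 : (s - 1) * s ≤ 2 * k) (hs3 : 2 * k < s * (s + 1)) : r = s := by
  by_contra hne
  rcases lt_or_gt_of_ne hne with h | h
  · nlinarith [mul_nonneg (show (0:Int) ≤ s - 1 - r by omega) (show (0:Int) ≤ s by omega),
      mul_nonneg (show (0:Int) ≤ r by omega) (show (0:Int) ≤ s - r - 1 by omega)]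
  · nlinarith [mul_nonneg (show (0:Int) ≤ r - 1 - s by omega) (show (0:Int) ≤ r by omega),
      mul_nonneg (show (0:Int) ≤ s by omega) (show (0:Int) ≤ r - s - 1 by omega)]

-- B's per-index value
def sval (k : Int) : Int := calcVal k k.toNat 1 (k + 1)

theorem sval_spec (k : Int) (hk : 0 ≤ k) :
    1 ≤ sval k ∧ (sval k - 1) * sval k ≤ 2 * k ∧ 2 * k < sval k * (sval k + 1) := by
  unfold sval
  refine calcVal_spec k.toNat 1 (k + 1) k (by norm_num) (by omega) (by norm_num; omega) ?_ (by omega)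
  nlinarith

-- the common bulk step of A: append min(i, numb - len) copies of i
def calcStep (numb : Int) (lst : List Int) (i : Int) : List Int :=
  lst ++ List.replicate (min i (numb - lst.length)).toNat i

-- A's inner loop computes one bulk step
theorem calcInnerA_eq (numb i : Int) : ∀ (f : Nat) (a : Int) (lst : List Int),
    0 ≤ a → a ≤ i → (i - a).toNat ≤ f → (lst.length : Int) ≤ numb →
    calcInnerA numb i f a lst = lst ++ List.replicate (min (i - a) (numb - lst.length)).toNat i := by
  intro f
  induction f with
  | zero =>
    intro a lst h0 hai hf hlen
    have : a = i := by omega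
    have : (min (i - a) (numb - lst.length)).toNat = 0 := by omega
    simp [calcInnerA, this]
  | succ f ih =>
    intro a lst h0 hai hf hlen
    by_cases hne : i = a
    · have : (min (i - a) (numb - lst.length)).toNat = 0 := by omega
      simp [calcInnerA, hne]
    · by_cases hfull : (lst.length : Int) = numb
      · have : (min (i - a) (numb - lst.length)).toNat = 0 := by omega
        simp [calcInnerA, hne, hfull]
      · have hlt : (lst.length : Int) < numb := lt_of_le_of_ne hlen hfull
        have hia : a < i := lt_of_le_of_ne hai (fun h => hne h.symm)
        rw [calcInnerA, if_pos hne, if_neg hfull]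
        rw [ih (a + 1) (lst ++ [i]) (by omega) (by omega) (by omega) (by simp; omega)]
        have hm : (min (i - a) (numb - lst.length)).toNat
            = (min (i - (a + 1)) (numb - ((lst ++ [i]).length : Int))).toNat + 1 := by
          simp
          omega
        rw [hm, List.replicate_succ]
        simp

theorem calcStep_len_le {numb : Int} {lst : List Int} (i : Int)
    (h : (lst.length : Int) ≤ numb) : ((calcStep numb lst i).length : Int) ≤ numb := by
  simp [calcStep]
  omega

-- A's fold equals the fold of bulk steps (elements of the range are ≥ 1; length stays ≤ numb)
theorem foldA_eq (numb : Int) : ∀ (l : List Int) (lst : List Int),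
    (∀ i ∈ l, 1 ≤ i) → (lst.length : Int) ≤ numb →
    l.foldl (fun lst i => calcInnerA numb i i.toNat 0 lst) lst = l.foldl (calcStep numb) lst := by
  intro l
  induction l with
  | nil => intro lst _ _; rfl
  | cons i t ih =>
    intro lst hmem hlen
    have hi : 1 ≤ i := hmem i (List.mem_cons_self ..)
    have hstep : calcInnerA numb i i.toNat 0 lst = calcStep numb lst i := by
      rw [calcInnerA_eq numb i i.toNat 0 lst (by omega) (by omega) (by omega) hlen]
      simp [calcStep]
    simp only [List.foldl_cons, hstep]
    exact ih _ (fun j hj => hmem j (List.mem_cons_of_mem _ hj)) (calcStep_len_le i hlen)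

-- one bulk step preserves the invariant: the list is the correct sval-prefix of length min(numb, T(i-1))
theorem step_inv (numb i : Int) (lst : List Int) (hi : 1 ≤ i)
    (hlen : 2 * (lst.length : Int) = min (2 * numb) ((i - 1) * i))
    (helts : ∀ (k : Nat) (hk : k < lst.length), lst[k] = sval k) :
    2 * ((calcStep numb lst i).length : Int) = min (2 * numb) (i * (i + 1)) ∧
      ∀ (k : Nat) (hk : k < (calcStep numb lst i).length), (calcStep numb lst i)[k] = sval k := by
  have hring : i * (i + 1) = (i - 1) * i + 2 * i := by ring
  have hlen2 : (calcStep numb lst i).length = lst.length + (min i (numb - lst.length)).toNat := by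
    simp [calcStep]
  constructor
  · rw [hlen2]; push_cast; omega
  · intro k hk
    by_cases hkl : k < lst.length
    · rw [show (calcStep numb lst i)[k] = lst[k] from by
        simp only [calcStep]; exact List.getElem_append_left hkl]
      exact helts k hkl
    · have hval : (calcStep numb lst i)[k] = i := by
        simp only [calcStep]
        rw [List.getElem_append_right (by omega)]
        exact List.getElem_replicate ..
      rw [hval]
      rw [hlen2] at hk
      have hk0 : (0 : Int) ≤ (k : Int) := by positivity
      obtain ⟨hs1, hs2, hs3⟩ := sval_spec k hk0
      refine tri_unique i (sval k) k hi ?_ ?_ hs1 hs2 hs3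
      · omega
      · omega

-- folding the bulk steps over [i, …, numb] from a correct prefix yields the full correct list
theorem foldInv (numb : Int) : ∀ (f : Nat) (i : Int) (lst : List Int),
    1 ≤ i → i ≤ numb + 1 → (numb + 1 - i).toNat = f →
    2 * (lst.length : Int) = min (2 * numb) ((i - 1) * i) →
    (∀ (k : Nat) (hk : k < lst.length), lst[k] = sval k) →
    2 * (((PySem.List.pyRange i (numb + 1) 1).foldl (calcStep numb) lst).length : Int)
        = min (2 * numb) (numb * (numb + 1)) ∧
      ∀ (k : Nat) (hk : k < ((PySem.List.pyRange i (numb + 1) 1).foldl (calcStep numb) lst).length),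
        ((PySem.List.pyRange i (numb + 1) 1).foldl (calcStep numb) lst)[k] = sval k := by
  intro f
  induction f with
  | zero =>
    intro i lst hi hub hf hlen helts
    have hieq : i = numb + 1 := by omega
    rw [PySem.List.pyRange_one_eq_nil (by omega)]
    subst hieq
    have he : (numb + 1 - 1) * (numb + 1) = numb * (numb + 1) := by ring
    rw [he] at hlen
    exact ⟨hlen, helts⟩
  | succ f ih =>
    intro i lst hi hub hf hlen helts
    have hlt : i < numb + 1 := by omega
    rw [PySem.List.pyRange_one_cons hlt]
    simp only [List.foldl_cons]
    obtain ⟨hlen', helts'⟩ := step_inv numb i lst hi hlen helts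
    have he : (i + 1 - 1) * (i + 1) = i * (i + 1) := by ring
    exact ih (i + 1) (calcStep numb lst i) (by omega) (by omega) (by omega) (by rw [he]; exact hlen') helts'

-- ===== VERDICT (by name: the statement is the Claim_ definition above) =====
theorem calc_py_spec : Claim_equal_calc_py := by
  intro numb _
  unfold Spec_calc_py calc_py calc_py_alt
  by_cases h : 0 ≤ numb
  · rw [foldA_eq numb _ [] (fun i hi => ((PySem.List.mem_pyRange_one).1 hi).1) (by simpa using h)]
    obtain ⟨hL, hE⟩ := foldInv numb (numb.toNat) 1 [] (by norm_num) (by omega) (by omega)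
      (by simp; omega) (by intro k hk; simp at hk)
    have htri : 2 * numb ≤ numb * (numb + 1) := by
      rcases eq_or_lt_of_le h with h0 | h0
      · rw [← h0]; norm_num
      · nlinarith
    have hmin : min (2 * numb) (numb * (numb + 1)) = 2 * numb := by omega
    rw [hmin] at hL
    apply List.ext_getElem
    · have : ((PySem.List.pyRange 0 numb 1).map (fun k => calcVal k k.toNat 1 (k + 1))).length
          = numb.toNat := by
        simp [PySem.List.length_pyRange_one]
      rw [this]; omega
    · intro k h1 h2
      rw [hE k h1, List.getElem_map]
      simp only [PySem.List.getElem_pyRange_one, zero_add, sval]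
  · rw [PySem.List.pyRange_one_eq_nil (by omega), PySem.List.pyRange_one_eq_nil (by omega)]
    simp
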